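-- pv_equiv track=rewrite | github.com/YashB63/GFG-Daily-Questions | Day 148/Make the array beautiful/make_the_array_beautiful.py | makeBeautiful
-- ===== SOURCE A (Python) =====
-- from typing import List
--
-- def makeBeautiful(arr: List[int]) -> List[int]:
--
--     list1 = []
--     for i in arr:
--         if len(list1) == 0:
--             list1.append(i)
--         elif (list1[-1] < 0 and i >= 0) or (list1[-1] >= 0 and i < 0):
--             list1.pop()
--         else:
--             list1.append(i)
--     return list1
-- ===== SOURCE B (Python) =====
-- from typing import List
--
-- def makeBeautiful(arr: List[int]) -> List[int]:
--     # Repeatedly delete the leftmost adjacent opposite-sign pair, restarting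
--     # the scan from the front, until no such pair remains.
--     lst = list(arr)
--     i = 0
--     while i + 1 < len(lst):
--         if (lst[i] < 0) != (lst[i + 1] < 0):
--             del lst[i:i + 2]
--             i = 0
--         else:
--             i += 1
--     return lst
-- ===== Notes on version B (the rewrite author's own statement) =====
-- stated objective: alternative
-- what changed: Replaces A's single stack pass with repeated left-to-right scans that delete the leftmost adjacent opposite-sign pair and restart until none remains.
import Mathlib
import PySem

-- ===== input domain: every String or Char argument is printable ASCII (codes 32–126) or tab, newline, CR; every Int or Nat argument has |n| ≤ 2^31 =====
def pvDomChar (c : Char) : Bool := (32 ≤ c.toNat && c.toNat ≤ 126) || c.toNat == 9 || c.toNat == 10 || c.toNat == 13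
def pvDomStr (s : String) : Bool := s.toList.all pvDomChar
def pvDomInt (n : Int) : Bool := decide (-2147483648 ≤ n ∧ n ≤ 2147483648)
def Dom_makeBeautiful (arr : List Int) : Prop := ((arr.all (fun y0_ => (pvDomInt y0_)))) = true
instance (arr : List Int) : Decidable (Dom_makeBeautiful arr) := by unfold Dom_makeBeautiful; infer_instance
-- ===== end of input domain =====

-- B re-implements A's one-pass stack elimination as repeated leftmost
-- opposite-sign-pair deletion with restart (alternative decomposition, not faster).
-- B works on a copy; neither mutates the caller's argument observably here.


-- ===== PORT A =====
-- one loop step: list1[-1] on a nonempty list is getLast!, .pop() is dropLast, .append is ++ [i]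
def stepA (list1 : List Int) (i : Int) : List Int :=
  if list1.length = 0 then list1 ++ [i]
  else if (list1.getLast! < 0 ∧ 0 ≤ i) ∨ (0 ≤ list1.getLast! ∧ i < 0) then list1.dropLast
  else list1 ++ [i]

def makeBeautiful (arr : List Int) : List Int :=
  arr.foldl stepA []

-- ===== PORT B =====
-- one full left-to-right scan of B's while-loop: remove the leftmost adjacent
-- opposite-sign pair ((lst[i] < 0) != (lst[i+1] < 0)) if any, else report none
def findPair : List Int → Option (List Int)
  | x :: y :: rest =>
      if decide (x < 0) ≠ decide (y < 0) then some rest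
      else (findPair (y :: rest)).map (x :: ·)
  | _ => none

theorem findPair_length : ∀ {l l' : List Int}, findPair l = some l' → l'.length + 2 = l.length := by
  intro l
  induction l with
  | nil => intro l' h; simp [findPair] at h
  | cons x t ih =>
    cases t with
    | nil => intro l' h; simp [findPair] at h
    | cons y rest =>
      intro l' h
      simp only [findPair] at h
      split at h
      · cases h; simp
      · simp only [Option.map_eq_some_iff] at h
        obtain ⟨t', ht', rfl⟩ := h
        have := ih ht'
        simpa using this

-- B: delete the leftmost pair and restart from the front until none remains
def makeBeautiful_alt (arr : List Int) : List Int :=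
  match h : findPair arr with
  | none => arr
  | some l' => makeBeautiful_alt l'
termination_by arr.length
decreasing_by have := findPair_length h; omega

-- ===== PRECONDITION & SPEC =====
def Spec_makeBeautiful (arr : List Int) (out : List Int) : Prop := out = makeBeautiful_alt arr
instance (arr : List Int) (out : List Int) : Decidable (Spec_makeBeautiful arr out) := by unfold Spec_makeBeautiful; infer_instance

-- ===== CLAIM (what is proved, stated in full; the proofs are below) =====
def Claim_equal_makeBeautiful : Prop := ∀ (arr : List Int), Dom_makeBeautiful arr → Spec_makeBeautiful arr (makeBeautiful arr)

-- ===== LEMMAS AND PROOFS =====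

-- A's pop condition is exactly "sign class differs"
theorem stepA_cond (a i : Int) :
    ((a < 0 ∧ 0 ≤ i) ∨ (0 ≤ a ∧ i < 0)) ↔ decide (a < 0) ≠ decide (i < 0) := by
  by_cases ha : a < 0 <;> by_cases hi : i < 0 <;> simp [ha, hi] <;> omega

theorem getLast!_mem {l : List Int} (h : l ≠ []) : l.getLast! ∈ l := by
  have h2 : l.getLast? = some (l.getLast h) := List.getLast?_eq_some_getLast h
  rw [List.getLast!_eq_getLast?_getD, h2]
  exact List.getLast_mem h

-- a run over a same-sign-class list from a same-class stack only pushes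
theorem foldl_homog (p : List Int) (b : Bool) :
    ∀ acc : List Int, (∀ a ∈ acc, decide (a < 0) = b) → (∀ a ∈ p, decide (a < 0) = b) →
      List.foldl stepA acc p = acc ++ p := by
  induction p with
  | nil => intro acc _ _; simp
  | cons x t ih =>
    intro acc hacc hp
    have hx : decide (x < 0) = b := hp x (by simp)
    have hstep : stepA acc x = acc ++ [x] := by
      by_cases hz : acc.length = 0
      · simp [stepA, hz]
      · have hne : acc ≠ [] := by intro h; simp [h] at hz
        have hl : decide (acc.getLast! < 0) = b := hacc _ (getLast!_mem hne)
        have hthis : ¬ ((acc.getLast! < 0 ∧ 0 ≤ x) ∨ (0 ≤ acc.getLast! ∧ x < 0)) := by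
          rw [stepA_cond, hl, hx]; simp
        rw [stepA, if_neg hz, if_neg hthis]
    have hacc2 : ∀ a ∈ acc ++ [x], decide (a < 0) = b := by
      intro a ha
      rcases List.mem_append.mp ha with h | h
      · exact hacc a h
      · simp at h; subst h; exact hx
    have ht : ∀ a ∈ t, decide (a < 0) = b := fun a ha => hp a (by simp [ha])
    rw [List.foldl_cons, hstep, ih (acc ++ [x]) hacc2 ht]
    simp

-- if no adjacent opposite-sign pair exists, every element has the head's class
theorem homog_of_none : ∀ {x : Int} {t : List Int}, findPair (x :: t) = none →
    ∀ a ∈ x :: t, decide (a < 0) = decide (x < 0) := by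
  intro x t
  induction t generalizing x with
  | nil => intro _ a ha; simp at ha; simp [ha]
  | cons y rest ih =>
    intro h a ha
    simp only [findPair] at h
    split at h
    · simp at h
    · rename_i hxy
      have hxy' : decide (x < 0) = decide (y < 0) := by
        by_contra hc; exact hxy hc
      have ht : findPair (y :: rest) = none := by
        cases hfp : findPair (y :: rest) with
        | none => rfl
        | some l' => simp [hfp] at h
      rcases List.mem_cons.mp ha with rfl | ha'
      · rfl
      · rw [ih ht a ha', hxy']

-- if no pair exists, A returns the list unchanged
theorem none_case {l : List Int} (h : findPair l = none) :
    List.foldl stepA [] l = l := by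
  cases l with
  | nil => simp
  | cons x t =>
    have := foldl_homog (x :: t) (decide (x < 0)) [] (by simp) (homog_of_none h)
    simpa using this

-- removing the leftmost opposite pair does not change A's run, provided the
-- stack so far has the class of the next element (true along A's real run)
theorem key : ∀ (l l' acc : List Int), findPair l = some l' →
    (∀ a ∈ acc, decide (a < 0) = decide (l.headI < 0)) →
    List.foldl stepA acc l = List.foldl stepA acc l' := by
  intro l
  induction l with
  | nil => intro l' acc h; simp [findPair] at h
  | cons x t ih =>
    cases t with
    | nil => intro l' acc h; simp [findPair] at h
    | cons y rest =>
      intro l' acc h hacc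
      simp only [findPair] at h
      simp only [List.headI] at hacc
      have hstep : stepA acc x = acc ++ [x] := by
        by_cases hz : acc.length = 0
        · simp [stepA, hz]
        · have hne : acc ≠ [] := by intro hh; simp [hh] at hz
          have hl := hacc _ (getLast!_mem hne)
          have hthis : ¬ ((acc.getLast! < 0 ∧ 0 ≤ x) ∨ (0 ≤ acc.getLast! ∧ x < 0)) := by
            rw [stepA_cond, hl]; simp
          rw [stepA, if_neg hz, if_neg hthis]
      split at h
      · -- (x,y) is the leftmost opposite pair: push x then pop it on y
        rename_i hxy
        cases h
        have hne2 : acc ++ [x] ≠ [] := by simp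
        have hlast : (acc ++ [x]).getLast! = x := by
          simp [List.getLast!_eq_getLast?_getD]
        have h2 : stepA (acc ++ [x]) y = acc := by
          have hc : ((acc ++ [x]).getLast! < 0 ∧ 0 ≤ y) ∨ (0 ≤ (acc ++ [x]).getLast! ∧ y < 0) := by
            rw [stepA_cond, hlast]; exact hxy
          have hz : ¬ ((acc ++ [x]).length = 0) := by simp
          rw [stepA, if_neg hz, if_pos hc]
          simp
        simp only [List.foldl_cons, hstep, h2]
      · -- same class at (x,y): x stays pushed, recurse on the tail
        rename_i hxy
        have hxy' : decide (x < 0) = decide (y < 0) := by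
          by_contra hc; exact hxy hc
        simp only [Option.map_eq_some_iff] at h
        obtain ⟨t', ht', rfl⟩ := h
        have hacc2 : ∀ a ∈ acc ++ [x], decide (a < 0) = decide ((y :: rest).headI < 0) := by
          intro a ha
          simp only [List.headI]
          rcases List.mem_append.mp ha with hh | hh
          · rw [hacc a hh]; exact hxy'
          · simp at hh; subst hh; exact hxy'
        have hmain := ih t' (acc ++ [x]) ht' hacc2
        calc List.foldl stepA acc (x :: y :: rest)
            = List.foldl stepA (acc ++ [x]) (y :: rest) := by simp [List.foldl_cons, hstep]
          _ = List.foldl stepA (acc ++ [x]) t' := hmain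
          _ = List.foldl stepA acc (x :: t') := by simp [List.foldl_cons, hstep]

theorem alt_eq_A : ∀ (l : List Int), makeBeautiful_alt l = makeBeautiful l := by
  intro l
  induction l using makeBeautiful_alt.induct with
  | case1 l h =>
    rw [makeBeautiful_alt, h, makeBeautiful, none_case h]
  | case2 l l' h ih =>
    have he : makeBeautiful_alt l = makeBeautiful_alt l' := by
      unfold makeBeautiful_alt
      split
      · rename_i h'; rw [h'] at h; cases h
      · rename_i l'' h'; rw [h'] at h; cases h; rw [makeBeautiful_alt]
    rw [he, ih, makeBeautiful, makeBeautiful, key l l' [] h (by simp)]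

-- ===== VERDICT (by name: the statement is the Claim_ definition above) =====
theorem makeBeautiful_spec : Claim_equal_makeBeautiful := by
  intro arr _
  exact (alt_eq_A arr).symm
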